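-- pv_equiv track=rewrite | github.com/familiarcat/alex-ai-universal | scripts/security/alex_ai_security_test.py | detect_xss
-- ===== SOURCE A (Python) =====
-- def detect_xss(content: str) -> bool:
--     """Simulate XSS detection"""
--     dangerous_patterns = [
--         "<script", "</script>", "javascript:", "vbscript:", "onerror=",
--         "onload=", "onclick=", "onmouseover=", "onfocus=", "onblur="
--     ]
--
--     content_lower = content.lower()
--     for pattern in dangerous_patterns:
--         if pattern in content_lower:
--             return False
--     return True
-- ===== SOURCE B (Python) =====
-- def detect_xss(content: str) -> bool:
--     """Simulate XSS detection"""
--     dangerous_patterns = [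
--         "<script", "</script>", "javascript:", "vbscript:", "onerror=",
--         "onload=", "onclick=", "onmouseover=", "onfocus=", "onblur="
--     ]
--     # Single left-to-right scan over positions: at each position, test whether
--     # any dangerous pattern starts there (case-insensitively), instead of
--     # running 10 independent full substring searches over a lowered copy.
--     for i in range(len(content)):
--         for pattern in dangerous_patterns:
--             if content[i:i+len(pattern)].lower() == pattern:
--                 return False
--     return True
-- ===== Notes on version B (the rewrite author's own statement) =====
-- stated objective: alternative
-- what changed: Replaces ten sequential whole-string substring searches over a lowered copy with a single position-major scan of the original string that tests, at each index, whether any pattern starts there case-insensitively.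
import Mathlib
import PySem

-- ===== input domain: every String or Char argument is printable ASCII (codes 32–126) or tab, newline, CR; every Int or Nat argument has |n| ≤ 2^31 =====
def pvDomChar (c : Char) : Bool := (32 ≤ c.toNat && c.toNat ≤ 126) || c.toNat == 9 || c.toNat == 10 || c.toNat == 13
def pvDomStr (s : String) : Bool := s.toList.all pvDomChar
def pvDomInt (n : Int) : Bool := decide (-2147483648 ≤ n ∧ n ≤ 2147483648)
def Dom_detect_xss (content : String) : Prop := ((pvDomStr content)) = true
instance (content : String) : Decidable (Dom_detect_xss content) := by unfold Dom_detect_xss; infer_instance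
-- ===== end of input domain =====

-- B replaces ten sequential whole-string substring searches over a lowered copy with one
-- position-major scan that tests, at each index, whether any pattern starts there (alternative; same cost).

-- the shared literal pattern list
def pvPatterns : List (List Char) :=
  ["<script".toList, "</script>".toList, "javascript:".toList, "vbscript:".toList, "onerror=".toList,
   "onload=".toList, "onclick=".toList, "onmouseover=".toList, "onfocus=".toList, "onblur=".toList]

-- ===== PORT A =====
-- 'for pattern in dangerous_patterns: if pattern in content_lower: return False' / 'return True'
def pvLoopA (cl : List Char) : List (List Char) → Bool
  | [] => true
  | p :: ps => if PySem.Chars.isIn p cl then false else pvLoopA cl ps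

def detect_xss (content : String) : Bool :=
  pvLoopA (PySem.Chars.lower content.toList) pvPatterns

-- ===== PORT B =====
-- inner 'for pattern …: if content[i:i+len(pattern)].lower() == pattern: return False'
-- (the slice content[i:i+len(p)] of the suffix starting at i is t.take p.length)
def pvMatchAt (t : List Char) : List (List Char) → Bool
  | [] => false
  | p :: ps => if PySem.Chars.lower (t.take p.length) == p then true else pvMatchAt t ps

-- outer 'for i in range(len(content))' as a scan over the suffixes of the string
def pvScan : List Char → Bool
  | [] => true
  | c :: rest => if pvMatchAt (c :: rest) pvPatterns then false else pvScan rest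

def detect_xss_alt (content : String) : Bool :=
  pvScan content.toList

-- ===== PRECONDITION & SPEC =====
def Spec_detect_xss (content : String) (out : Bool) : Prop := out = detect_xss_alt content
instance (content : String) (out : Bool) : Decidable (Spec_detect_xss content out) := by unfold Spec_detect_xss; infer_instance

-- ===== CLAIM (what is proved, stated in full; the proofs are below) =====
def Claim_equal_detect_xss : Prop := ∀ (content : String), Dom_detect_xss content → Spec_detect_xss content (detect_xss content)

-- ===== LEMMAS AND PROOFS =====

theorem pvLoopA_iff (cl : List Char) (ps : List (List Char)) :
    pvLoopA cl ps = true ↔ ∀ p ∈ ps, ¬ p <:+: cl := by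
  induction ps with
  | nil => simp [pvLoopA]
  | cons p ps ih =>
    simp only [pvLoopA]
    cases h : PySem.Chars.isIn p cl with
    | true =>
      have hin := (PySem.Chars.isIn_iff_infix p cl).mp h
      rw [if_pos rfl]
      exact iff_of_false (by simp) (fun hall => hall p (by simp) hin)
    | false =>
      have hni := (PySem.Chars.isIn_eq_false_iff p cl).mp h
      rw [if_neg (by simp)]
      simp [ih, hni]

theorem pvMatchAt_iff (t : List Char) (ps : List (List Char)) :
    pvMatchAt t ps = true ↔ ∃ p ∈ ps, PySem.Chars.lower (t.take p.length) = p := by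
  induction ps with
  | nil => simp [pvMatchAt]
  | cons p ps ih =>
    simp only [pvMatchAt]
    by_cases h : PySem.Chars.lower (t.take p.length) = p
    · rw [if_pos (by simp [h])]
      exact iff_of_true rfl ⟨p, by simp, h⟩
    · rw [if_neg (by simp [h]), ih]
      constructor
      · rintro ⟨q, hq, hl⟩; exact ⟨q, List.mem_cons_of_mem p hq, hl⟩
      · rintro ⟨q, hq, hl⟩
        rw [List.mem_cons] at hq
        rcases hq with hq | hq
        · subst hq; exact absurd hl h
        · exact ⟨q, hq, hl⟩

-- a pattern is a prefix of the lowered string iff lowering the window of its length yields it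
theorem pvPrefix_iff (p t : List Char) :
    p <+: PySem.Chars.lower t ↔ PySem.Chars.lower (t.take p.length) = p := by
  rw [List.prefix_iff_eq_take]
  unfold PySem.Chars.lower
  rw [List.map_take]
  exact eq_comm

theorem pvScan_iff (l : List Char) :
    pvScan l = true ↔ ∀ p ∈ pvPatterns, ¬ p <:+: PySem.Chars.lower l := by
  induction l with
  | nil => simp only [pvScan]; decide
  | cons c rest ih =>
    simp only [pvScan]
    by_cases h : pvMatchAt (c :: rest) pvPatterns = true
    · obtain ⟨p, hp, hl⟩ := (pvMatchAt_iff _ _).mp h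
      have hinf : p <:+: PySem.Chars.lower (c :: rest) :=
        ((pvPrefix_iff p (c :: rest)).mpr hl).isInfix
      rw [if_pos h]
      exact iff_of_false (by simp) (fun hall => hall p hp hinf)
    · rw [if_neg h, ih]
      constructor
      · intro hall p hp hinf
        unfold PySem.Chars.lower at hinf
        rw [List.map_cons, List.infix_cons_iff] at hinf
        rcases hinf with hpre | hinf
        · have hw : PySem.Chars.lower ((c :: rest).take p.length) = p := by
            apply (pvPrefix_iff p (c :: rest)).mp
            unfold PySem.Chars.lower
            simpa using hpre
          exact h ((pvMatchAt_iff _ _).mpr ⟨p, hp, hw⟩)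
        · exact hall p hp hinf
      · intro hall p hp hinf
        apply hall p hp
        unfold PySem.Chars.lower
        rw [List.map_cons, List.infix_cons_iff]
        right
        exact hinf

-- ===== VERDICT (by name: the statement is the Claim_ definition above) =====
theorem detect_xss_spec : Claim_equal_detect_xss := by
  intro content _
  unfold Spec_detect_xss detect_xss detect_xss_alt
  have h : (pvLoopA (PySem.Chars.lower content.toList) pvPatterns = true) ↔
      (pvScan content.toList = true) :=
    (pvLoopA_iff _ _).trans (pvScan_iff content.toList).symm
  cases hLa : pvLoopA (PySem.Chars.lower content.toList) pvPatterns <;>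
  cases hSb : pvScan content.toList <;> simp_all
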